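-- pv_equiv track=rewrite | github.com/ZeroLinC/comp-9021-python-assignment1 | Question1/superpower.py | swithing_at_most_once
-- ===== SOURCE A (Python) =====
-- def swithing_at_most_once(power,n):
--     positive = []
--     negative = []
--
--     for i in range(len(power)):
--         if power[i] < 0:
--             negative.append(power[i])
--         if power[i] >= 0:
--             positive.append(power[i])
--
--     negative = sorted(negative)
--     if n <= len(negative):
--         for _ in range(n):
--             low = negative[0]
--             negative.remove(low)
--             positive.append(low*(-1))
--
--     if n > len(negative):
--         nb_negative = len(negative)
--         negative = [-x for x in negative]
--         positive = sorted(positive)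
--         for _ in range(n - nb_negative):
--             low = positive[0]
--             positive.remove(low)
--             negative.append(low*(-1))
--
--
--     result = sum(positive)+sum(negative)
--     return result
-- ===== SOURCE B (Python) =====
-- def swithing_at_most_once(power, n):
--     smallest = sorted(power)[:max(n, 0)]
--     return sum(power) - 2 * sum(smallest)
-- ===== Notes on version B (the rewrite author's own statement) =====
-- stated objective: simpler
-- what changed: B sorts once and flips the n smallest elements via a slice sum (sum(power) - 2*sum of the n smallest), replacing A's two-phase partition / repeated list.remove loops.
-- intended difference: When 1 <= n <= m < 2n (m = number of negatives), A's shrunken negative list re-triggers the second branch, so A flips the remaining negatives up and the 2n-m smallest nonnegatives down and returns that over-flipped sum (e.g. A([-1],1) = -1), while B returns the intended sum with exactly the n smallest elements sign-flipped (B([-1],1) = 1); D_ is that region minus the inputs where A's surplus flips cancel exactly. — e.g. on swithing_at_most_once([-1], 1): A returns -1, B returns 1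
import Mathlib
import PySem

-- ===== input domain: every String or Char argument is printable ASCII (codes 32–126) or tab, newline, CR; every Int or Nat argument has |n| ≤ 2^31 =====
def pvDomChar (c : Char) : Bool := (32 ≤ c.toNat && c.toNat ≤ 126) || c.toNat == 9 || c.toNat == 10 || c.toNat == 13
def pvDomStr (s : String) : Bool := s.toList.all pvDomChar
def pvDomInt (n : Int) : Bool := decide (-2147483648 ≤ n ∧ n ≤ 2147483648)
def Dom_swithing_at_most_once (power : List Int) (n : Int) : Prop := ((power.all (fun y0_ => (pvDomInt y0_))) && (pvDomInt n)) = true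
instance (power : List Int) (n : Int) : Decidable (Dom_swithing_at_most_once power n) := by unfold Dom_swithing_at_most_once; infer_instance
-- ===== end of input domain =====

-- B flips the n smallest elements by a single sort and slice sum, simpler than A's two repeated-remove loops (whose second loop can re-run after the first — see D_ below).

-- ===== PORT A =====
-- the 'for _ in range(n): low = negative[0]; negative.remove(low); positive.append(low*(-1))' loop
-- (negative[0] raises on an empty list; inside Pre_ the list is never empty here, headD's default is unreachable)
def pvFlipNegLoop : Nat → List Int → List Int → List Int × List Int
  | 0, negative, positive => (negative, positive)
  | k+1, negative, positive =>
    let low := negative.headD 0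
    pvFlipNegLoop k ((PySem.List.remove? negative low).getD negative) (positive ++ [low * (-1)])

-- the same loop shape over 'positive'
def pvFlipPosLoop : Nat → List Int → List Int → List Int × List Int
  | 0, positive, negative => (positive, negative)
  | k+1, positive, negative =>
    let low := positive.headD 0
    pvFlipPosLoop k ((PySem.List.remove? positive low).getD positive) (negative ++ [low * (-1)])

def swithing_at_most_once (power : List Int) (n : Int) : Int :=
  let split := power.foldl (fun (acc : List Int × List Int) x =>
      (if x < 0 then acc.1 ++ [x] else acc.1,
       if 0 ≤ x then acc.2 ++ [x] else acc.2)) ([], [])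
  let negative := PySem.List.sorted split.1 (fun x => x) false
  let st1 := if n ≤ (negative.length : Int)
    then pvFlipNegLoop n.toNat negative split.2
    else (negative, split.2)
  let st2 := if n > (st1.1.length : Int)
    then
      let nb : Int := st1.1.length
      let negative2 := st1.1.map (fun x => -x)
      let positive2 := PySem.List.sorted st1.2 (fun x => x) false
      let r := pvFlipPosLoop (n - nb).toNat positive2 negative2
      (r.2, r.1)
    else st1
  st2.2.sum + st2.1.sum

-- ===== PORT B =====
def swithing_at_most_once_alt (power : List Int) (n : Int) : Int :=
  let smallest := PySem.List.slice (PySem.List.sorted power (fun x => x) false) none (some (max n 0))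
  power.sum - 2 * smallest.sum

-- ===== PRECONDITION & SPEC =====
-- Pre_ excludes exactly n > len(power), where A's second loop runs out of elements and raises IndexError.
def Pre_swithing_at_most_once (power : List Int) (n : Int) : Prop := n ≤ (power.length : Int)
instance (power : List Int) (n : Int) : Decidable (Pre_swithing_at_most_once power n) := by
  unfold Pre_swithing_at_most_once; infer_instance
def pvWitness_swithing_at_most_once : List Int × Int := ([-1, 2], 1)

-- input-shape helpers for D_ (they do not use either port)
def pvNegPart (power : List Int) : List Int := power.filter (fun x => decide (x < 0))
def pvPosPart (power : List Int) : List Int := power.filter (fun x => decide (0 ≤ x))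
-- the net amount by which A's surplus flips move the sum (0 on the cancellation corners)
def pvExtra (power : List Int) (n : Int) : Int :=
  let sn := PySem.List.sorted (pvNegPart power) (fun x => x) false
  ((PySem.List.sorted (pvPosPart power ++ (sn.take n.toNat).map (fun x => -x)) (fun x => x) false).take
      (2 * n - (sn.length : Int)).toNat).sum
    + (sn.drop n.toNat).sum

-- When 1 ≤ n ≤ m < 2n (m = number of negatives), A's shrunken negative list re-triggers the second
-- branch, so A flips the remaining negatives up and the 2n-m smallest nonnegatives down and returns
-- that over-flipped sum (A([-1],1) = -1), while B returns the intended sum with exactly the n smallest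
-- elements sign-flipped (B([-1],1) = 1); D_ is that region minus the inputs where A's surplus flips
-- cancel exactly (pvExtra = 0).
def D_swithing_at_most_once (power : List Int) (n : Int) : Prop :=
  1 ≤ n ∧ n ≤ ((pvNegPart power).length : Int) ∧ ((pvNegPart power).length : Int) < 2 * n ∧
    pvExtra power n ≠ 0
instance (power : List Int) (n : Int) : Decidable (D_swithing_at_most_once power n) := by
  unfold D_swithing_at_most_once; infer_instance

def Spec_swithing_at_most_once (power : List Int) (n : Int) (out : Int) : Prop :=
  ¬ D_swithing_at_most_once power n → out = swithing_at_most_once_alt power n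
instance (power : List Int) (n : Int) (out : Int) : Decidable (Spec_swithing_at_most_once power n out) := by
  unfold Spec_swithing_at_most_once; infer_instance

def pvDiffWitness_swithing_at_most_once : List Int × Int := ([-1], 1)
def pvDiffWitnessOut_swithing_at_most_once : Int × Int := (-1, 1)

-- ===== CLAIM (what is proved, stated in full; the proofs are below) =====
def Claim_unchanged_swithing_at_most_once : Prop := ∀ (power : List Int) (n : Int), Dom_swithing_at_most_once power n → Pre_swithing_at_most_once power n → Spec_swithing_at_most_once power n (swithing_at_most_once power n)
def Claim_changed_swithing_at_most_once : Prop := Dom_swithing_at_most_once (pvDiffWitness_swithing_at_most_once.1) (pvDiffWitness_swithing_at_most_once.2) ∧ Pre_swithing_at_most_once (pvDiffWitness_swithing_at_most_once.1) (pvDiffWitness_swithing_at_most_once.2) ∧ D_swithing_at_most_once (pvDiffWitness_swithing_at_most_once.1) (pvDiffWitness_swithing_at_most_once.2) ∧ swithing_at_most_once (pvDiffWitness_swithing_at_most_once.1) (pvDiffWitness_swithing_at_most_once.2) = pvDiffWitnessOut_swithing_at_most_once.1 ∧ swithing_at_most_once_alt (pvDiffWitness_swithing_at_most_once.1) (pvDiffWitness_swithing_at_most_once.2)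 = pvDiffWitnessOut_swithing_at_most_once.2 ∧ pvDiffWitnessOut_swithing_at_most_once.1 ≠ pvDiffWitnessOut_swithing_at_most_once.2
def Claim_exact_swithing_at_most_once : Prop := ∀ (power : List Int) (n : Int), Dom_swithing_at_most_once power n → Pre_swithing_at_most_once power n → D_swithing_at_most_once power n → swithing_at_most_once power n ≠ swithing_at_most_once_alt power n

-- ===== LEMMAS AND PROOFS =====

theorem pv_split_aux (power a b : List Int) :
    power.foldl (fun (acc : List Int × List Int) x =>
      (if x < 0 then acc.1 ++ [x] else acc.1, if 0 ≤ x then acc.2 ++ [x] else acc.2)) (a, b)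
    = (a ++ power.filter (fun x => decide (x < 0)), b ++ power.filter (fun x => decide (0 ≤ x))) := by
  induction power generalizing a b with
  | nil => simp
  | cons x t ih =>
    simp only [List.foldl_cons, List.filter_cons]
    rw [ih]
    by_cases hx : x < 0
    · have hx2 : ¬ (0 ≤ x) := by omega
      simp [hx, hx2]
    · have hx2 : 0 ≤ x := by omega
      simp [hx, hx2]

theorem pv_flipNeg (k : Nat) (l pos : List Int) (hk : k ≤ l.length) :
    pvFlipNegLoop k l pos = (l.drop k, pos ++ (l.take k).map (fun x => x * (-1))) := by
  induction k generalizing l pos with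
  | zero => simp [pvFlipNegLoop]
  | succ k ih =>
    cases l with
    | nil => simp at hk
    | cons a t =>
      simp only [pvFlipNegLoop, List.headD_cons, PySem.List.remove?_cons_self, Option.getD_some]
      rw [ih t _ (by simpa using hk)]
      simp

theorem pv_flipPos (k : Nat) (l neg : List Int) (hk : k ≤ l.length) :
    pvFlipPosLoop k l neg = (l.drop k, neg ++ (l.take k).map (fun x => x * (-1))) := by
  induction k generalizing l neg with
  | zero => simp [pvFlipPosLoop]
  | succ k ih =>
    cases l with
    | nil => simp at hk
    | cons a t =>
      simp only [pvFlipPosLoop, List.headD_cons, PySem.List.remove?_cons_self, Option.getD_some]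
      rw [ih t _ (by simpa using hk)]
      simp

theorem pv_filter_not (power : List Int) :
    power.filter (fun x => decide (0 ≤ x)) = power.filter (fun x => !decide (x < 0)) := by
  apply List.filter_congr
  intro x _
  by_cases h : x < 0 <;> simp [h] <;> omega

theorem pv_parts_perm (power : List Int) : (pvNegPart power ++ pvPosPart power).Perm power := by
  unfold pvNegPart pvPosPart
  rw [pv_filter_not]
  exact List.filter_append_perm _ power

theorem pv_mem_neg {power : List Int} {x : Int} (h : x ∈ pvNegPart power) : x < 0 := by
  have := List.of_mem_filter h
  simpa using this

theorem pv_mem_pos {power : List Int} {x : Int} (h : x ∈ pvPosPart power) : 0 ≤ x := by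
  have := List.of_mem_filter h
  simpa using this

theorem pv_sorted_split (power : List Int) :
    PySem.List.sorted power (fun x => x) false
      = PySem.List.sorted (pvNegPart power) (fun x => x) false
        ++ PySem.List.sorted (pvPosPart power) (fun x => x) false := by
  apply PySem.List.sorted_id_eq_of_perm_of_pairwise
  · exact ((PySem.List.sorted_perm _ _ _).append (PySem.List.sorted_perm _ _ _)).trans
      (pv_parts_perm power)
  · rw [List.pairwise_append]
    refine ⟨by simpa using PySem.List.sorted_pairwise (xs := pvNegPart power) (key := fun x => x),
      by simpa using PySem.List.sorted_pairwise (xs := pvPosPart power) (key := fun x => x), ?_⟩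
    intro x hx y hy
    have hx' : x < 0 := pv_mem_neg ((PySem.List.mem_sorted _ _ _ _).mp hx)
    have hy' : 0 ≤ y := pv_mem_pos ((PySem.List.mem_sorted _ _ _ _).mp hy)
    omega

theorem pv_sum_sorted (l : List Int) : (PySem.List.sorted l (fun x => x) false).sum = l.sum :=
  (PySem.List.sorted_perm _ _ _).sum_eq

theorem pv_sum_map_neg (l : List Int) : (l.map (fun x => -x)).sum = -l.sum := by
  induction l with
  | nil => simp
  | cons a t ih =>
    simp only [List.map_cons, List.sum_cons, ih]
    ring

theorem pv_sum_take_drop (l : List Int) (k : Nat) : (l.take k).sum + (l.drop k).sum = l.sum := by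
  rw [← List.sum_append, List.take_append_drop]

theorem pv_main (power : List Int) (n : Int) (hpre : Pre_swithing_at_most_once power n) :
    swithing_at_most_once power n = swithing_at_most_once_alt power n
      - 2 * (if 1 ≤ n ∧ n ≤ ((pvNegPart power).length : Int) ∧ ((pvNegPart power).length : Int) < 2 * n
             then pvExtra power n else 0) := by
  have hparts := pv_parts_perm power
  have hlen : (pvNegPart power).length + (pvPosPart power).length = power.length := by
    simpa using hparts.length_eq
  have hsum : (pvNegPart power).sum + (pvPosPart power).sum = power.sum := by
    simpa using hparts.sum_eq
  have hfun : (fun x : Int => x * (-1)) = (fun x : Int => -x) := by funext x; ring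
  have hpre' : n ≤ (power.length : Int) := hpre
  unfold swithing_at_most_once swithing_at_most_once_alt pvExtra
  rw [pv_split_aux]
  simp only [List.nil_append]
  have e1 : power.filter (fun x => decide (x < 0)) = pvNegPart power := rfl
  have e2 : power.filter (fun x => decide (0 ≤ x)) = pvPosPart power := rfl
  rw [e1, e2, pv_sorted_split power]
  rw [PySem.List.slice_to _ (by omega : (0:Int) ≤ max n 0)]
  have hmax : (max n 0).toNat = n.toNat := by omega
  rw [hmax]
  set SN := PySem.List.sorted (pvNegPart power) (fun x => x) false with hSN
  set SP := PySem.List.sorted (pvPosPart power) (fun x => x) false with hSP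
  have hSNlen : SN.length = (pvNegPart power).length := PySem.List.length_sorted _ _ _
  have hSPlen : SP.length = (pvPosPart power).length := PySem.List.length_sorted _ _ _
  have hSNsum : SN.sum = (pvNegPart power).sum := pv_sum_sorted _
  have hSPsum : SP.sum = (pvPosPart power).sum := pv_sum_sorted _
  by_cases hn : n ≤ (SN.length : Int)
  · rw [if_pos hn]
    rw [pv_flipNeg n.toNat SN (pvPosPart power) (by omega)]
    dsimp only
    rw [hfun]
    simp only [List.length_drop]
    rw [List.take_append_of_le_length (by omega : n.toNat ≤ SN.length)]
    by_cases hc : n > ((SN.length - n.toNat : Nat) : Int)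
    · rw [if_pos hc, if_pos (by omega :
        1 ≤ n ∧ n ≤ ((pvNegPart power).length : Int) ∧ ((pvNegPart power).length : Int) < 2 * n)]
      rw [pv_flipPos ((n - ((SN.length - n.toNat : Nat) : Int)).toNat)
        (PySem.List.sorted (pvPosPart power ++ List.map (fun x => -x) (List.take n.toNat SN)) (fun x => x) false)
        (List.map (fun x => -x) (List.drop n.toNat SN)) (by
        rw [PySem.List.length_sorted (pvPosPart power ++ List.map (fun x => -x) (List.take n.toNat SN))]
        simp only [List.length_append, List.length_map, List.length_take]
        omega)]
      dsimp only
      rw [hfun]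
      have hk : (n - ((SN.length - n.toNat : Nat) : Int)).toNat = (2 * n - (SN.length : Int)).toNat := by
        omega
      rw [hk]
      set P2 := PySem.List.sorted (pvPosPart power ++ List.map (fun x => -x) (List.take n.toNat SN)) (fun x => x) false with hP2
      have hP2sum : P2.sum = (pvPosPart power).sum - (List.take n.toNat SN).sum := by
        rw [hP2, pv_sum_sorted, List.sum_append, pv_sum_map_neg]
        ring
      have ht1 := pv_sum_take_drop P2 (2 * n - (SN.length : Int)).toNat
      have ht2 := pv_sum_take_drop SN n.toNat
      simp only [List.sum_append, pv_sum_map_neg]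
      omega
    · rw [if_neg hc, if_neg (by omega :
        ¬ (1 ≤ n ∧ n ≤ ((pvNegPart power).length : Int) ∧ ((pvNegPart power).length : Int) < 2 * n))]
      dsimp only
      have ht2 := pv_sum_take_drop SN n.toNat
      simp only [List.sum_append, pv_sum_map_neg]
      omega
  · rw [if_neg hn]
    dsimp only
    rw [if_pos (by omega : n > (SN.length : Int))]
    rw [pv_flipPos ((n - (SN.length : Int)).toNat)
      (PySem.List.sorted (pvPosPart power) (fun x => x) false)
      (List.map (fun x => -x) SN) (by
      rw [PySem.List.length_sorted (pvPosPart power)]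
      omega)]
    dsimp only
    rw [hfun, ← hSP]
    rw [if_neg (by omega :
      ¬ (1 ≤ n ∧ n ≤ ((pvNegPart power).length : Int) ∧ ((pvNegPart power).length : Int) < 2 * n))]
    rw [List.take_append]
    rw [List.take_of_length_le (by omega : SN.length ≤ n.toNat)]
    have ht1 := pv_sum_take_drop SP (n.toNat - SN.length)
    have hk : (n - (SN.length : Int)).toNat = n.toNat - SN.length := by omega
    rw [hk]
    simp only [List.sum_append, pv_sum_map_neg]
    omega

-- ===== VERDICT (by name: the statement is the Claim_ definition above) =====
theorem swithing_at_most_once_spec : Claim_unchanged_swithing_at_most_once := by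
  intro power n _ hpre hnd
  have h := pv_main power n hpre
  by_cases hr : 1 ≤ n ∧ n ≤ ((pvNegPart power).length : Int) ∧ ((pvNegPart power).length : Int) < 2 * n
  · have hz : pvExtra power n = 0 := by
      by_contra hz
      exact hnd ⟨hr.1, hr.2.1, hr.2.2, hz⟩
    rw [if_pos hr, hz] at h
    omega
  · rw [if_neg hr] at h
    omega

theorem swithing_at_most_once_changed : Claim_changed_swithing_at_most_once := by
  unfold Claim_changed_swithing_at_most_once; decide

theorem swithing_at_most_once_tight : Claim_exact_swithing_at_most_once := by
  intro power n _ hpre hd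
  have h := pv_main power n hpre
  rw [if_pos ⟨hd.1, hd.2.1, hd.2.2.1⟩] at h
  have := hd.2.2.2
  omega
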